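-- pv_equiv track=rewrite | github.com/suzzini/programmers_codingtest | 탐욕법-체육복.py | solution
-- ===== SOURCE A (Python) =====
-- def solution(n, lost, reserve):
--     lost_list = sorted(list(set(lost).difference(set(reserve))))
--     reserve_list = sorted(list(set(reserve).difference(set(lost))))
--     for l in lost_list:
--         if l-1 in reserve_list:
--             reserve_list.remove(l-1)
--             continue
--         elif l+1 in reserve_list:
--             reserve_list.remove(l+1)
--             continue
--         n-=1
--     return n
-- ===== SOURCE B (Python) =====
-- def solution(n, lost, reserve):
--     L = sorted(set(lost).difference(set(reserve)))
--     R = sorted(set(reserve).difference(set(lost)))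
--     i = j = 0
--     unserved = 0
--     while i < len(L):
--         if j == len(R):
--             unserved += len(L) - i
--             break
--         l = L[i]
--         r = R[j]
--         if r < l - 1:
--             j += 1
--         elif r <= l + 1:
--             i += 1
--             j += 1
--         else:
--             unserved += 1
--             i += 1
--     return n - unserved
-- ===== Notes on version B (the rewrite author's own statement) =====
-- stated objective: faster
-- what changed: A repeatedly scans the reserve list with 'in' and 'remove' for each lost student; B merges the two sorted lists with a single two-pointer pass and counts unserved students.
import Mathlib
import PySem

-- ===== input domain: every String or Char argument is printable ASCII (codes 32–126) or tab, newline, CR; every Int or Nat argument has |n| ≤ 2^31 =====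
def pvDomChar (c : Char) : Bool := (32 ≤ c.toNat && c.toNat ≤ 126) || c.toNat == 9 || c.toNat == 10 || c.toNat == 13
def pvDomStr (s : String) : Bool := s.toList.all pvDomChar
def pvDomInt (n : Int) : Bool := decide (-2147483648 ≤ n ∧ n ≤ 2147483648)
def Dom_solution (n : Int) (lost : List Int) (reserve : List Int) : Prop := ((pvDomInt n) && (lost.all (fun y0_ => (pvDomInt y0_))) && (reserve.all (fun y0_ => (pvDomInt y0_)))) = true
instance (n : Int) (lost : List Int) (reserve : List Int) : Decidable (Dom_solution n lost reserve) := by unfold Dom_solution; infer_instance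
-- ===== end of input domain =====

-- B replaces A's repeated list-membership/remove scans by a single two-pointer merge
-- over the two sorted lists (faster by a constant factor on the measured sizes).

-- ===== PORT A =====
-- one iteration of A's 'for l in lost_list' body over the state (n, reserve_list);
-- list.remove(v) under the 'v in list' guard is List.erase (first occurrence)
def aStep (st : Int × List Int) (l : Int) : Int × List Int :=
  if (l - 1) ∈ st.2 then (st.1, st.2.erase (l - 1))
  else if (l + 1) ∈ st.2 then (st.1, st.2.erase (l + 1))
  else (st.1 - 1, st.2)

def solution (n : Int) (lost : List Int) (reserve : List Int) : Int :=
  let lost_list := PySem.List.sorted (PySem.Set.diff (PySem.Set.ofList lost) (PySem.Set.ofList reserve)) (fun x => x) false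
  let reserve_list := PySem.List.sorted (PySem.Set.diff (PySem.Set.ofList reserve) (PySem.Set.ofList lost)) (fun x => x) false
  (lost_list.foldl aStep (n, reserve_list)).1

-- ===== PORT B =====
-- B's 'while i < len(L)' loop; i and j only grow and start at 0, so Python's
-- 'j == len(R)' test is written as the equivalent 'R.length ≤ j' to make the
-- recursion total; L[i]/R[j] are read under the in-range guards, exact as getD.
def bLoop (L R : List Int) (i j : Nat) (unserved : Int) : Int :=
  if i < L.length then
    if R.length ≤ j then unserved + ((L.length : Int) - (i : Int))
    else
      let l := L.getD i 0
      let r := R.getD j 0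
      if r < l - 1 then bLoop L R i (j + 1) unserved
      else if r ≤ l + 1 then bLoop L R (i + 1) (j + 1) unserved
      else bLoop L R (i + 1) j (unserved + 1)
  else unserved
termination_by (L.length - i) + (R.length - j)
decreasing_by all_goals omega

def solution_alt (n : Int) (lost : List Int) (reserve : List Int) : Int :=
  let L := PySem.List.sorted (PySem.Set.diff (PySem.Set.ofList lost) (PySem.Set.ofList reserve)) (fun x => x) false
  let R := PySem.List.sorted (PySem.Set.diff (PySem.Set.ofList reserve) (PySem.Set.ofList lost)) (fun x => x) false
  n - bLoop L R 0 0 0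

-- ===== PRECONDITION & SPEC =====
def Spec_solution (n : Int) (lost : List Int) (reserve : List Int) (out : Int) : Prop := out = solution_alt n lost reserve
instance (n : Int) (lost : List Int) (reserve : List Int) (out : Int) : Decidable (Spec_solution n lost reserve out) := by unfold Spec_solution; infer_instance

-- ===== CLAIM (what is proved, stated in full; the proofs are below) =====
def Claim_equal_solution : Prop := ∀ (n : Int) (lost : List Int) (reserve : List Int), Dom_solution n lost reserve → Spec_solution n lost reserve (solution n lost reserve)

-- ===== LEMMAS AND PROOFS =====

-- number of lost students left unserved: the common two-pointer recursion both loops compute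
def uc : List Int → List Int → Int
  | [], _ => 0
  | _ :: L, [] => 1 + uc L []
  | l :: L, r :: R =>
    if r < l - 1 then uc (l :: L) R
    else if r ≤ l + 1 then uc L R
    else 1 + uc L (r :: R)
termination_by L R => L.length + R.length

theorem uc_nil (L : List Int) : uc L [] = (L.length : Int) := by
  induction L with
  | nil => simp [uc]
  | cons l L ih =>
    rw [uc, ih]
    push_cast [List.length_cons]
    ring

-- B's index loop computes uc on the remaining suffixes
theorem bLoop_eq_uc (L R : List Int) (i j : Nat) (u : Int) (hj : j ≤ R.length) :
    bLoop L R i j u = u + uc (L.drop i) (R.drop j) := by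
  fun_induction bLoop L R i j u with
  | case1 i j u hi hj' =>
    have hj'' : j = R.length := le_antisymm hj hj'
    rw [hj'', List.drop_length, uc_nil, List.length_drop]
    omega
  | case2 i j u hi hj' l r hr ih =>
    have hjlt : j < R.length := by omega
    have hl : l = L[i] := List.getD_eq_getElem L 0 hi
    have hrv : r = R[j] := List.getD_eq_getElem R 0 hjlt
    rw [hl, hrv] at hr
    rw [ih (by omega)]
    conv_rhs => rw [List.drop_eq_getElem_cons hi, List.drop_eq_getElem_cons hjlt]
    simp only [uc]
    rw [if_pos hr, ← List.drop_eq_getElem_cons hi]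
  | case3 i j u hi hj' l r hr hr2 ih =>
    have hjlt : j < R.length := by omega
    have hl : l = L[i] := List.getD_eq_getElem L 0 hi
    have hrv : r = R[j] := List.getD_eq_getElem R 0 hjlt
    rw [hl, hrv] at hr hr2
    rw [ih (by omega)]
    conv_rhs => rw [List.drop_eq_getElem_cons hi, List.drop_eq_getElem_cons hjlt]
    simp only [uc]
    rw [if_neg hr, if_pos hr2]
  | case4 i j u hi hj' l r hr hr2 ih =>
    have hjlt : j < R.length := by omega
    have hl : l = L[i] := List.getD_eq_getElem L 0 hi
    have hrv : r = R[j] := List.getD_eq_getElem R 0 hjlt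
    rw [hl, hrv] at hr hr2
    rw [ih (by omega)]
    conv_rhs => rw [List.drop_eq_getElem_cons hi, List.drop_eq_getElem_cons hjlt]
    simp only [uc]
    rw [if_neg hr, if_neg hr2, ← List.drop_eq_getElem_cons hjlt]
    ring
  | case5 i j u hi =>
    rw [List.drop_of_length_le (by omega)]
    simp only [uc]
    ring

-- a stale reserve element s (s < l - 1 for every remaining l) is never matched by A's loop
theorem foldl_aStep_stale (L : List Int) (R : List Int) (n s : Int)
    (hs : ∀ l ∈ L, s < l - 1) :
    L.foldl aStep (n, s :: R) = ((L.foldl aStep (n, R)).1, s :: (L.foldl aStep (n, R)).2) := by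
  induction L generalizing R n with
  | nil => simp
  | cons l L ih =>
    have hsl := hs l (by simp)
    have e1 : ¬ (s = l - 1) := by omega
    have e2 : ¬ (l - 1 = s) := by omega
    have e3 : ¬ (s = l + 1) := by omega
    have e4 : ¬ (l + 1 = s) := by omega
    have hs' : ∀ l' ∈ L, s < l' - 1 := fun l' h => hs l' (by simp [h])
    simp only [List.foldl_cons]
    by_cases h1 : (l - 1) ∈ R
    · have t1 : aStep (n, s :: R) l = (n, s :: R.erase (l - 1)) := by
        simp [aStep, h1, e1, e2]
      have t2 : aStep (n, R) l = (n, R.erase (l - 1)) := by simp [aStep, h1]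
      rw [t1, t2, ih _ _ hs']
    · by_cases h2 : (l + 1) ∈ R
      · have t1 : aStep (n, s :: R) l = (n, s :: R.erase (l + 1)) := by
          simp [aStep, h1, h2, e2, e3, e4]
        have t2 : aStep (n, R) l = (n, R.erase (l + 1)) := by simp [aStep, h1, h2]
        rw [t1, t2, ih _ _ hs']
      · have t1 : aStep (n, s :: R) l = (n - 1, s :: R) := by
          simp [aStep, h1, h2, e2, e4]
        have t2 : aStep (n, R) l = (n - 1, R) := by simp [aStep, h1, h2]
        rw [t1, t2, ih _ _ hs']

-- A's loop over sorted, disjoint, duplicate-free lists leaves exactly uc L R students unserved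
theorem foldl_aStep_eq_uc (L R : List Int)
    (hL : L.Pairwise (· < ·)) (hR : R.Pairwise (· < ·))
    (hdisj : ∀ x ∈ L, x ∉ R) : ∀ n : Int,
    (L.foldl aStep (n, R)).1 = n - uc L R := by
  fun_induction uc L R with
  | case1 R => intro n; simp
  | case2 l L ih =>
    intro n
    have hstep : aStep (n, []) l = (n - 1, []) := by simp [aStep]
    simp only [List.foldl_cons, hstep]
    rw [ih (hL.sublist (by simp)) (by simp) (by simp) (n - 1)]
    simp only [uc_nil]
    ring
  | case3 l L r R hr ih =>
    intro n
    -- r < l - 1 : r is stale for every element of l :: L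
    have hs : ∀ x ∈ l :: L, r < x - 1 := by
      intro x hx
      rcases List.mem_cons.mp hx with h | h
      · omega
      · have := (List.pairwise_cons.mp hL).1 x h; omega
    rw [foldl_aStep_stale _ _ _ _ hs,
        ih hL (hR.sublist (by simp)) (fun x hx => by
          have := hdisj x hx; simp at this; tauto) n]
  | case4 l L r R hr hr2 ih =>
    intro n
    -- l - 1 ≤ r ≤ l + 1 and r ≠ l : a match, consuming both heads
    have hlr : l ≠ r := by
      intro h; exact hdisj l (by simp) (by simp [h])
    have hL' := List.pairwise_cons.mp hL
    have hR' := List.pairwise_cons.mp hR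
    have hstep : List.foldl aStep (n, r :: R) (l :: L) = List.foldl aStep (n, R) L := by
      by_cases hc : r = l - 1
      · simp [aStep, hc]
      · have hc2 : r = l + 1 := by omega
        have hm1 : ¬ (l - 1 = r) := by omega
        have hm2 : l - 1 ∉ R := fun h => by have := hR'.1 _ h; omega
        have hm3 : ¬ (l + 1 = l - 1) := by omega
        have hm4 : ¬ (l - 1 = l + 1) := by omega
        simp [aStep, hc2, hm2, hm4]
    rw [hstep, ih hL'.2 hR'.2 (fun x hx => by
        have := hdisj x (by simp [hx]); simp at this; tauto) n]
  | case5 l L r R hr hr2 ih =>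
    intro n
    -- r > l + 1 : l is unserved
    have hR' := List.pairwise_cons.mp hR
    have h1 : (l - 1) ∉ r :: R := by
      simp only [List.mem_cons]
      rintro (h | h)
      · omega
      · have := hR'.1 _ h; omega
    have h2 : (l + 1) ∉ r :: R := by
      simp only [List.mem_cons]
      rintro (h | h)
      · omega
      · have := hR'.1 _ h; omega
    have hstep : aStep (n, r :: R) l = (n - 1, r :: R) := by simp [aStep, h1, h2]
    simp only [List.foldl_cons, hstep]
    rw [ih ((List.pairwise_cons.mp hL).2) hR (fun x hx => hdisj x (by simp [hx])) (n - 1)]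
    ring

-- sorted of a duplicate-free Int list is strictly increasing
theorem sorted_nodup_pairwise_lt (xs : List Int) (h : xs.Nodup) :
    (PySem.List.sorted xs (fun x => x) false).Pairwise (· < ·) := by
  have h1 : (PySem.List.sorted xs (fun x => x) false).Pairwise (· ≤ ·) := by
    simpa using PySem.List.sorted_pairwise (key := fun x => x) (xs := xs)
  have h2 : (PySem.List.sorted xs (fun x => x) false).Nodup :=
    (PySem.List.sorted_perm (xs := xs) (key := fun x => x) (rev := false)).nodup_iff.mpr h
  have := List.Pairwise.and h1 h2
  exact this.imp (by rintro a b ⟨hle, hne⟩; omega)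

theorem solution_eq_alt (n : Int) (lost reserve : List Int) :
    solution n lost reserve = solution_alt n lost reserve := by
  unfold solution solution_alt
  dsimp only
  set Ls := PySem.Set.diff (PySem.Set.ofList lost) (PySem.Set.ofList reserve) with hLs
  set Rs := PySem.Set.diff (PySem.Set.ofList reserve) (PySem.Set.ofList lost) with hRs
  set L := PySem.List.sorted Ls (fun x => x) false with hLdef
  set R := PySem.List.sorted Rs (fun x => x) false with hRdef
  have hLp : L.Pairwise (· < ·) :=
    sorted_nodup_pairwise_lt _ (PySem.Set.nodup_diff _ _ (PySem.Set.nodup_ofList _))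
  have hRp : R.Pairwise (· < ·) :=
    sorted_nodup_pairwise_lt _ (PySem.Set.nodup_diff _ _ (PySem.Set.nodup_ofList _))
  have hdisj : ∀ x ∈ L, x ∉ R := by
    intro x hxL hxR
    rw [hLdef, PySem.List.mem_sorted, hLs, PySem.Set.mem_diff] at hxL
    rw [hRdef, PySem.List.mem_sorted, hRs, PySem.Set.mem_diff] at hxR
    exact hxL.2 hxR.1
  rw [foldl_aStep_eq_uc L R hLp hRp hdisj n, bLoop_eq_uc L R 0 0 0 (by omega)]
  simp

-- ===== VERDICT (by name: the statement is the Claim_ definition above) =====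
theorem solution_spec : Claim_equal_solution := by
  intro n lost reserve _
  unfold Spec_solution
  exact solution_eq_alt n lost reserve
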